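-- pv_equiv track=rewrite | github.com/tumBAIS/euro-meets-neurips-2022 | training/src/util.py | get_edges_in_solution
-- ===== SOURCE A (Python) =====
-- def get_edges_in_solution(solution):
--     edges_solution = []
--     for solution_route in solution:
--         for request_idx, request in enumerate(solution_route):
--             if request_idx == 0:  # add first element
--                 edges_solution.append([0, request])
--             if request_idx == len(solution_route) - 1:
--                 edges_solution.append([request, 0])  # add last element
--             else:
--                 edges_solution.append([request, solution_route[request_idx + 1]])
--     return edges_solution
-- ===== SOURCE B (Python) =====
-- def get_edges_in_solution(solution):
--     # build the edge list back-to-front: walk the routes (and each route) in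
--     # reverse, carrying the successor node, then reverse once at the end
--     rev = []
--     for route in reversed(solution):
--         nxt = 0
--         for node in reversed(route):
--             rev.append([node, nxt])
--             nxt = node
--         if route:
--             rev.append([0, route[0]])
--     rev.reverse()
--     return rev
-- ===== Notes on version B (the rewrite author's own statement) =====
-- stated objective: alternative
-- what changed: Builds the edge list back-to-front: walks the routes and each route in reverse carrying the successor node (no indexing, no boundary branches, no padding), then reverses the accumulator once at the end.
import Mathlib
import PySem

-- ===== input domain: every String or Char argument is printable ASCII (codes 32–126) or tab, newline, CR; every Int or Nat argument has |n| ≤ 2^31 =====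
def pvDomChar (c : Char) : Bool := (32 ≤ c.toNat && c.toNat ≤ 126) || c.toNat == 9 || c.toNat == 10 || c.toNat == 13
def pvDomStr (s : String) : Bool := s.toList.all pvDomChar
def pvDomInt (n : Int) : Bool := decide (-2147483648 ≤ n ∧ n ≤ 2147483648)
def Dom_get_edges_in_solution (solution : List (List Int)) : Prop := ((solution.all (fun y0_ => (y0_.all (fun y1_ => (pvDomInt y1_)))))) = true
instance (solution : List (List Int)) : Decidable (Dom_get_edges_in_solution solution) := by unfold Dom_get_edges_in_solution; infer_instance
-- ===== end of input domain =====

-- B builds the same edge list back-to-front (reverse walk carrying the successor node,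
-- one final reverse) instead of A's indexed loop with boundary branches; same cost.

-- ===== PORT A =====
-- inner loop body of A: for (request_idx, request) in enumerate(solution_route)
-- `solution_route[request_idx + 1]` is ported with pyGet?; the `.getD 0` default is
-- unreachable: in the else branch request_idx + 1 < len(solution_route), so pyGet? = some _.
def pvStepA (solution_route : List Int) (acc : List (List Int)) (p : Int × Int) : List (List Int) :=
  let acc1 := if p.1 = 0 then acc ++ [[0, p.2]] else acc
  if p.1 = (solution_route.length : Int) - 1 then acc1 ++ [[p.2, 0]]
  else acc1 ++ [[p.2, (PySem.List.pyGet? solution_route (p.1 + 1)).getD 0]]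

def get_edges_in_solution (solution : List (List Int)) : List (List Int) :=
  solution.foldl
    (fun edges_solution solution_route =>
      (PySem.List.enumerate solution_route 0).foldl (pvStepA solution_route) edges_solution)
    []

-- ===== PORT B =====
-- inner loop body of B: for node in reversed(route): rev.append([node, nxt]); nxt = node
def pvStepB (st : List (List Int) × Int) (node : Int) : List (List Int) × Int :=
  (st.1 ++ [[node, st.2]], node)

def get_edges_in_solution_alt (solution : List (List Int)) : List (List Int) :=
  (solution.reverse.foldl
    (fun rev route =>
      let st := route.reverse.foldl pvStepB (rev, 0)
      match route with
      | [] => st.1                      -- `if route:` false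
      | r :: _ => st.1 ++ [[0, r]])     -- rev.append([0, route[0]])
    []).reverse

-- ===== PRECONDITION & SPEC =====
def Spec_get_edges_in_solution (solution : List (List Int)) (out : List (List Int)) : Prop := out = get_edges_in_solution_alt solution
instance (solution : List (List Int)) (out : List (List Int)) : Decidable (Spec_get_edges_in_solution solution out) := by unfold Spec_get_edges_in_solution; infer_instance

-- ===== CLAIM (what is proved, stated in full; the proofs are below) =====
def Claim_equal_get_edges_in_solution : Prop := ∀ (solution : List (List Int)), Dom_get_edges_in_solution solution → Spec_get_edges_in_solution solution (get_edges_in_solution solution)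

-- ===== LEMMAS AND PROOFS =====

-- the edges of one route, as both programs produce them (proof-only characterisation)
def pvRouteEdges (route : List Int) : List (List Int) :=
  if route.isEmpty then []
  else
    let path : List Int := 0 :: route ++ [0]
    (path.zip path.tail).map (fun p => [p.1, p.2])

-- successor-pair list built by B's inner loop: [[r0,r1],...,[rk,nxt]]
def pvPairs (route : List Int) (nxt : Int) : List (List Int) :=
  match route with
  | [] => []
  | r :: rs => [r, rs.headD nxt] :: pvPairs rs nxt

-- zipping against a shorter right list ignores what is appended to the left list
theorem pv_zip_extend {α β : Type} (z : List β) : ∀ (a : List α) (b : List α),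
    z.length ≤ a.length → (a ++ b).zip z = a.zip z := by
  induction z with
  | nil => intro a b _; simp
  | cons w z' ih =>
    intro a b h
    cases a with
    | nil => simp at h
    | cons x a' =>
      simp only [List.cons_append, List.zip_cons_cons]
      rw [ih a' b (by simpa using h)]

theorem pvPairs_zip : ∀ (route : List Int) (nxt : Int),
    pvPairs route nxt = (route.zip (route.tail ++ [nxt])).map (fun p => [p.1, p.2]) := by
  intro route
  induction route with
  | nil => intro nxt; rfl
  | cons r rs ih =>
    intro nxt
    cases rs with
    | nil => rfl
    | cons s rs' =>
      rw [show pvPairs (r :: s :: rs') nxt = [r, s] :: pvPairs (s :: rs') nxt from rfl,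
        ih nxt]
      simp [List.zip_cons_cons]

-- generalized inner-loop lemma for A, indices k ≥ 1 over the suffix t = route.drop k
theorem pv_inner_suffix (route : List Int) (t : List Int) :
    ∀ (k : Nat) (acc : List (List Int)), 1 ≤ k → route.drop k = t →
    (PySem.List.enumerate t (k : Int)).foldl (pvStepA route) acc
      = acc ++ (t.zip (route.drop (k + 1) ++ [0])).map (fun p => [p.1, p.2]) := by
  induction t with
  | nil =>
    intro k acc _ h
    simp [PySem.List.enumerate_nil]
  | cons x t ih =>
    intro k acc hk h
    have hlen : k < route.length := by
      by_contra hge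
      simp [List.drop_eq_nil_of_le (Nat.le_of_not_lt hge)] at h
    have hdrop1 : route.drop (k + 1) = t := by
      have h1 : (route.drop k).drop 1 = route.drop (k + 1) := List.drop_drop
      rw [h] at h1
      rw [← h1]
      rfl
    rw [PySem.List.enumerate_cons]
    rw [List.foldl_cons]
    have hne0 : ¬ ((k : Int) = 0) := by omega
    have hlen_eq : t.length + 1 = route.length - k := by
      have := congrArg List.length h
      simp [List.length_drop] at this
      omega
    cases t with
    | nil =>
      have hlast : (k : Int) = (route.length : Int) - 1 := by
        simp at hlen_eq; omega
      simp only [pvStepA]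
      rw [if_neg hne0, if_pos hlast, PySem.List.enumerate_nil]
      simp [hdrop1]
    | cons y t' =>
      have hnotlast : ¬ ((k : Int) = (route.length : Int) - 1) := by
        simp at hlen_eq; omega
      have hgety : (PySem.List.pyGet? route ((k : Int) + 1)).getD 0 = y := by
        have hcast : ((k : Int) + 1) = ((k + 1 : Nat) : Int) := by push_cast; ring
        rw [hcast, PySem.List.pyGet?_natCast]
        have : route[k+1]? = (route.drop (k+1))[0]? := by
          rw [List.getElem?_drop]
        rw [this, hdrop1]
        rfl
      simp only [pvStepA, if_neg hne0, if_neg hnotlast, hgety]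
      have hcast1 : (k : Int) + 1 = ((k + 1 : Nat) : Int) := by push_cast; ring
      rw [hcast1, ih (k + 1) (acc ++ [[x, y]]) (by omega) hdrop1]
      have hdrop2 : route.drop (k + 1 + 1) = t' := by
        have : route.drop (k + 1 + 1) = (route.drop (k + 1)).drop 1 := by
          rw [List.drop_drop]
        rw [this, hdrop1]; rfl
      rw [hdrop2]
      simp [hdrop1, List.zip_cons_cons]

-- per-route lemma: A's inner loop appends exactly pvRouteEdges
theorem pv_inner (route : List Int) (acc : List (List Int)) :
    (PySem.List.enumerate route 0).foldl (pvStepA route) acc = acc ++ pvRouteEdges route := by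
  cases route with
  | nil => simp [PySem.List.enumerate_nil, pvRouteEdges]
  | cons r rest =>
    rw [PySem.List.enumerate_cons, List.foldl_cons]
    cases rest with
    | nil =>
      simp [pvStepA, pvRouteEdges, PySem.List.enumerate_nil]
    | cons s rest' =>
      have hnotlast : ¬ ((0 : Int) = ((r :: s :: rest').length : Int) - 1) := by
        simp; omega
      have hgets : (PySem.List.pyGet? (r :: s :: rest') ((0 : Int) + 1)).getD 0 = s := by
        rw [show ((0 : Int) + 1) = ((1 : Nat) : Int) from by norm_num, PySem.List.pyGet?_natCast]
        simp
      simp only [pvStepA, if_neg hnotlast, hgets]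
      have hdrop : (r :: s :: rest').drop 1 = s :: rest' := rfl
      rw [show ((0:Int) + 1) = ((1 : Nat) : Int) by norm_num,
        pv_inner_suffix (r :: s :: rest') (s :: rest') 1 _ (by omega) hdrop]
      have hdrop2 : (r :: s :: rest').drop (1 + 1) = rest' := rfl
      rw [hdrop2]
      have hz : ((s :: rest') ++ [0]).zip (rest' ++ [(0:Int)]) = (s :: rest').zip (rest' ++ [0]) :=
        pv_zip_extend (rest' ++ [0]) (s :: rest') [0] (by simp)
      simp only [pvRouteEdges, List.isEmpty_cons, List.cons_append, List.tail_cons,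
        List.zip_cons_cons, List.map_cons, Bool.false_eq_true, if_false]
      rw [show (s :: (rest' ++ [(0:Int)])) = (s :: rest') ++ [0] from rfl, hz]
      simp

-- A's outer fold = flatMap of pvRouteEdges
theorem pv_A_flat (solution : List (List Int)) (acc : List (List Int)) :
    solution.foldl
      (fun edges_solution solution_route =>
        (PySem.List.enumerate solution_route 0).foldl (pvStepA solution_route) edges_solution)
      acc
    = acc ++ solution.flatMap pvRouteEdges := by
  induction solution generalizing acc with
  | nil => simp
  | cons route rest ih =>
    rw [List.foldl_cons, pv_inner, ih, List.flatMap_cons, List.append_assoc]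

-- B's inner backward loop (foldl over the reversed route = foldr), carrying the successor
theorem pv_B_inner : ∀ (route : List Int) (acc : List (List Int)) (nxt : Int),
    route.foldr (fun x y => pvStepB y x) (acc, nxt)
      = (acc ++ (pvPairs route nxt).reverse, route.headD nxt) := by
  intro route
  induction route with
  | nil => intro acc nxt; simp [pvPairs]
  | cons r rs ih =>
    intro acc nxt
    simp only [List.foldr_cons]
    rw [ih acc nxt]
    simp [pvStepB, pvPairs]

-- one step of B's outer loop appends (pvRouteEdges route).reverse
theorem pv_B_route (route : List Int) (rev : List (List Int)) :
    (let st := route.reverse.foldl pvStepB (rev, 0)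
     match route with
     | [] => st.1
     | r :: _ => st.1 ++ [[0, r]])
    = rev ++ (pvRouteEdges route).reverse := by
  cases route with
  | nil => simp [pvRouteEdges]
  | cons r rs =>
    show (((r :: rs).reverse.foldl pvStepB (rev, 0)).1 ++ [[0, r]])
        = rev ++ (pvRouteEdges (r :: rs)).reverse
    rw [List.foldl_reverse, pv_B_inner]
    have hz : ((r :: rs) ++ [(0:Int)]).zip (rs ++ [(0:Int)]) = (r :: rs).zip (rs ++ [0]) :=
      pv_zip_extend (rs ++ [0]) (r :: rs) [0] (by simp)
    simp only [pvRouteEdges, List.isEmpty_cons, Bool.false_eq_true, if_false,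
      List.cons_append, List.tail_cons, List.zip_cons_cons]
    rw [show (r :: (rs ++ [(0:Int)])) = (r :: rs) ++ [0] from rfl, hz]
    rw [pvPairs_zip]
    simp

-- B's outer backward fold = reversed flatMap of pvRouteEdges
theorem pv_B_flat (solution : List (List Int)) (acc : List (List Int)) :
    solution.reverse.foldl
      (fun rev route =>
        let st := route.reverse.foldl pvStepB (rev, 0)
        match route with
        | [] => st.1
        | r :: _ => st.1 ++ [[0, r]])
      acc
    = acc ++ (solution.flatMap pvRouteEdges).reverse := by
  rw [List.foldl_reverse]
  induction solution generalizing acc with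
  | nil => simp
  | cons route rest ih =>
    simp only [List.foldr_cons]
    rw [pv_B_route, ih, List.flatMap_cons]
    simp

-- ===== VERDICT (by name: the statement is the Claim_ definition above) =====
theorem get_edges_in_solution_spec : Claim_equal_get_edges_in_solution := by
  intro solution _
  show get_edges_in_solution solution = get_edges_in_solution_alt solution
  unfold get_edges_in_solution get_edges_in_solution_alt
  rw [pv_A_flat, pv_B_flat]
  simp
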